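-- pv_equiv track=rewrite | github.com/owenstrength/nba_sleeper | utils/helpers.py | get_my_team_and_opponent_team
-- ===== SOURCE A (Python) =====
-- def get_my_team_and_opponent_team(roster_id, matchups):
--     """
--     Get your team and opponent team data for a given week and team ID.
--
--     Args:
--         week (int): The week number
--         team_id (int): Your team ID
--
--     Returns:
--         tuple: (my_team_data, opponent_team_data)
--     """
--     team_matchup_data = None
--     matchup_id = None
--     for matchup in matchups:
--         if matchup['roster_id'] == roster_id:
--             team_matchup_data = matchup
--             matchup_id = matchup['matchup_id']
--             break
--
--     opponent_matchup_data = None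
--     for matchup in matchups:
--         if matchup['matchup_id'] == matchup_id and matchup['roster_id'] != roster_id:
--             opponent_matchup_data = matchup
--             break
--
--     return team_matchup_data, opponent_matchup_data
-- ===== SOURCE B (Python) =====
-- def get_my_team_and_opponent_team(roster_id, matchups):
--     """
--     Get your team and opponent team data for a given week and team ID.
--
--     One pass builds an index of matchups grouped by matchup_id and finds the
--     team's matchup; the opponent is then looked up in that group directly.
--     """
--     groups = {}
--     team_matchup_data = None
--     for matchup in matchups:
--         groups.setdefault(matchup['matchup_id'], []).append(matchup)
--         if team_matchup_data is None and matchup['roster_id'] == roster_id: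
--             team_matchup_data = matchup
--
--     matchup_id = team_matchup_data['matchup_id'] if team_matchup_data is not None else None
--     opponent_matchup_data = next(
--         (m for m in groups.get(matchup_id, []) if m['roster_id'] != roster_id),
--         None)
--     return team_matchup_data, opponent_matchup_data
-- ===== Notes on version B (the rewrite author's own statement) =====
-- stated objective: alternative
-- what changed: A scans the matchup list twice (one loop to find the team, a second full scan for the opponent); B makes a single pass that builds a dict grouping matchups by matchup_id while finding the team, then picks the opponent directly from the team's group.
import Mathlib
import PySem

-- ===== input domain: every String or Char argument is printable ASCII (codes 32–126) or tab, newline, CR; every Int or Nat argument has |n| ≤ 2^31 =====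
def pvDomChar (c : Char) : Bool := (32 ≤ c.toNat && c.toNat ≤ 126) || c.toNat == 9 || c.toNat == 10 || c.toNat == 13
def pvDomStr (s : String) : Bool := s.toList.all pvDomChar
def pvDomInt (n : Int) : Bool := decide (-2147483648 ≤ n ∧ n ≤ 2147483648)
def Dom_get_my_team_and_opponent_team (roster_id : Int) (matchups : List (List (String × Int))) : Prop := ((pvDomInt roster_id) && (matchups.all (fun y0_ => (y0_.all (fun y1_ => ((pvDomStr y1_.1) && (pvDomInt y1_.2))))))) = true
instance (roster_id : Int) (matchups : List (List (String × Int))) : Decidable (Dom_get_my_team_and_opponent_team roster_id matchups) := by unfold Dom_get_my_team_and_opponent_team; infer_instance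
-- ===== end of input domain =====

-- B replaces A's two scans of the list by one pass that indexes matchups by matchup_id
-- and finds the team, followed by a direct group lookup for the opponent (alternative decomposition).

-- matchup['key']: first-match association-list lookup (Python dict access; none = KeyError)
def pvLookup (m : List (String × Int)) (k : String) : Option Int := List.lookup k m

-- ===== PORT A =====
-- first loop of A: find the team's matchup and its matchup_id (break at first hit)
def pvAloop1 (roster_id : Int) : List (List (String × Int)) → Option (List (String × Int)) × Option Int
  | [] => (none, none)
  | m :: rest =>
    if pvLookup m "roster_id" = some roster_id then (some m, pvLookup m "matchup_id")
    else pvAloop1 roster_id rest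

-- second loop of A: first matchup with the same matchup_id and a different roster_id
def pvAloop2 (roster_id : Int) (matchup_id : Option Int) : List (List (String × Int)) → Option (List (String × Int))
  | [] => none
  | m :: rest =>
    if pvLookup m "matchup_id" = matchup_id ∧ pvLookup m "roster_id" ≠ some roster_id then some m
    else pvAloop2 roster_id matchup_id rest

def get_my_team_and_opponent_team (roster_id : Int) (matchups : List (List (String × Int))) : (Option (List (String × Int))) × (Option (List (String × Int))) :=
  let t := pvAloop1 roster_id matchups
  (t.1, pvAloop2 roster_id t.2 matchups)

-- ===== PORT B =====
-- one step of B's single pass: append m to its matchup_id group, record the team at first hit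
def pvBstep (roster_id : Int)
    (st : PySem.Dict Int (List (List (String × Int))) × Option (List (String × Int)))
    (m : List (String × Int)) :
    PySem.Dict Int (List (List (String × Int))) × Option (List (String × Int)) :=
  (st.1.modify ((pvLookup m "matchup_id").getD 0) [] (· ++ [m]),
   match st.2 with
   | some t => some t
   | none => if pvLookup m "roster_id" = some roster_id then some m else none)

def get_my_team_and_opponent_team_alt (roster_id : Int) (matchups : List (List (String × Int))) : (Option (List (String × Int))) × (Option (List (String × Int))) :=
  let st := matchups.foldl (pvBstep roster_id) (PySem.Dict.empty, none)
  let matchup_id : Option Int := st.2.bind (fun t => pvLookup t "matchup_id")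
  let group : List (List (String × Int)) :=
    match matchup_id with
    | some k => st.1.getD k []
    | none => []
  (st.2, group.find? (fun m => pvLookup m "roster_id" != some roster_id))

-- ===== PRECONDITION & SPEC =====
-- Pre_ excludes matchups missing a 'roster_id' or 'matchup_id' key: Python A raises KeyError on
-- any such matchup it scans (and B, which scans them all, raises on any such matchup at all);
-- A can still return when an early break leaves a malformed matchup unscanned — those inputs are excluded too.
def Pre_get_my_team_and_opponent_team (roster_id : Int) (matchups : List (List (String × Int))) : Prop :=
  ∀ m ∈ matchups, (List.lookup "roster_id" m).isSome ∧ (List.lookup "matchup_id" m).isSome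
instance (roster_id : Int) (matchups : List (List (String × Int))) : Decidable (Pre_get_my_team_and_opponent_team roster_id matchups) := by unfold Pre_get_my_team_and_opponent_team; infer_instance

def pvWitness_get_my_team_and_opponent_team : Int × (List (List (String × Int))) :=
  (1, [[("roster_id", 1), ("matchup_id", 2)], [("roster_id", 2), ("matchup_id", 2)]])

def Spec_get_my_team_and_opponent_team (roster_id : Int) (matchups : List (List (String × Int))) (out : (Option (List (String × Int))) × (Option (List (String × Int)))) : Prop := out = get_my_team_and_opponent_team_alt roster_id matchups
instance (roster_id : Int) (matchups : List (List (String × Int))) (out : (Option (List (String × Int))) × (Option (List (String × Int)))) : Decidable (Spec_get_my_team_and_opponent_team roster_id matchups out) := by unfold Spec_get_my_team_and_opponent_team; infer_instance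

-- ===== CLAIM (what is proved, stated in full; the proofs are below) =====
def Claim_equal_get_my_team_and_opponent_team : Prop := ∀ (roster_id : Int) (matchups : List (List (String × Int))), Dom_get_my_team_and_opponent_team roster_id matchups → Pre_get_my_team_and_opponent_team roster_id matchups → Spec_get_my_team_and_opponent_team roster_id matchups (get_my_team_and_opponent_team roster_id matchups)

-- ===== LEMMAS AND PROOFS =====

-- B's fold never unsets the team once found
theorem pvFold_snd_some (roster_id : Int) (l : List (List (String × Int)))
    (d : PySem.Dict Int (List (List (String × Int)))) (x : List (String × Int)) :
    (l.foldl (pvBstep roster_id) (d, some x)).2 = some x := by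
  induction l generalizing d with
  | nil => rfl
  | cons m rest ih => simpa [List.foldl, pvBstep] using ih _

-- B's fold finds the same team as A's first loop
theorem pvFold_snd (roster_id : Int) (l : List (List (String × Int)))
    (d : PySem.Dict Int (List (List (String × Int)))) :
    (l.foldl (pvBstep roster_id) (d, none)).2 = (pvAloop1 roster_id l).1 := by
  induction l generalizing d with
  | nil => rfl
  | cons m rest ih =>
    by_cases h : pvLookup m "roster_id" = some roster_id
    · simp [List.foldl, pvBstep, pvAloop1, h, pvFold_snd_some]
    · simpa [List.foldl, pvBstep, pvAloop1, h] using ih _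

-- A's matchup_id is determined by A's found team
theorem pvAloop1_snd (roster_id : Int) (l : List (List (String × Int))) :
    (pvAloop1 roster_id l).2 = (pvAloop1 roster_id l).1.bind (fun t => pvLookup t "matchup_id") := by
  induction l with
  | nil => rfl
  | cons m rest ih =>
    by_cases h : pvLookup m "roster_id" = some roster_id <;> simp [pvAloop1, h, ih]

-- the group stored under k is exactly the matchups whose matchup_id (defaulted) is k, in order
theorem pvFold_groups (roster_id : Int) (l : List (List (String × Int)))
    (d : PySem.Dict Int (List (List (String × Int)))) (t : Option (List (String × Int))) (k : Int) :
    ((l.foldl (pvBstep roster_id) (d, t)).1).getD k [] =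
      d.getD k [] ++ l.filter (fun m => (pvLookup m "matchup_id").getD 0 == k) := by
  induction l generalizing d t with
  | nil => simp
  | cons m rest ih =>
    rw [List.foldl_cons, show (pvBstep roster_id (d, t) m) =
      (d.modify ((pvLookup m "matchup_id").getD 0) [] (· ++ [m]), (pvBstep roster_id (d, t) m).2) from rfl, ih]
    by_cases h : (pvLookup m "matchup_id").getD 0 = k
    · simp [h, PySem.Dict.getD_modify_self]
    · simp [PySem.Dict.getD_modify, Ne.symm h, h]

-- A's second loop is a find? over the matching-id group
theorem pvAloop2_eq_find (roster_id k : Int) (l : List (List (String × Int))) :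
    pvAloop2 roster_id (some k) l =
      (l.filter (fun m => pvLookup m "matchup_id" == some k)).find?
        (fun m => pvLookup m "roster_id" != some roster_id) := by
  induction l with
  | nil => rfl
  | cons m rest ih =>
    by_cases h1 : pvLookup m "matchup_id" = some k
    · by_cases h2 : pvLookup m "roster_id" = some roster_id <;>
        simp [pvAloop2, h1, h2, ih]
    · simp [pvAloop2, h1, ih]

-- with every matchup carrying a matchup_id, A's second loop with matchup_id None finds nothing
theorem pvAloop2_none (roster_id : Int) (l : List (List (String × Int)))
    (h : ∀ m ∈ l, (List.lookup "matchup_id" m).isSome) :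
    pvAloop2 roster_id none l = none := by
  induction l with
  | nil => rfl
  | cons m rest ih =>
    obtain ⟨v, hv⟩ := Option.isSome_iff_exists.mp (h m (by simp))
    simp [pvAloop2, pvLookup, hv, ih (fun x hx => h x (List.mem_cons_of_mem _ hx))]

-- a found team is an element of the list
theorem pvAloop1_mem (roster_id : Int) (l : List (List (String × Int))) (t : List (String × Int))
    (h : (pvAloop1 roster_id l).1 = some t) : t ∈ l := by
  induction l with
  | nil => simp [pvAloop1] at h
  | cons m rest ih =>
    by_cases hm : pvLookup m "roster_id" = some roster_id
    · simp [pvAloop1, hm] at h; simp [h]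
    · simp [pvAloop1, hm] at h; exact List.mem_cons_of_mem _ (ih h)

-- ===== VERDICT (by name: the statement is the Claim_ definition above) =====
theorem get_my_team_and_opponent_team_spec : Claim_equal_get_my_team_and_opponent_team := by
  intro roster_id matchups _hdom hpre
  unfold Spec_get_my_team_and_opponent_team get_my_team_and_opponent_team get_my_team_and_opponent_team_alt
  simp only [pvFold_snd roster_id matchups PySem.Dict.empty, pvAloop1_snd]
  cases ht : (pvAloop1 roster_id matchups).1 with
  | none =>
    simp only [Option.bind_none]
    rw [pvAloop2_none roster_id matchups (fun m hm => (hpre m hm).2)]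
    rfl
  | some t =>
    obtain ⟨k, hk⟩ := Option.isSome_iff_exists.mp (hpre t (pvAloop1_mem _ _ _ ht)).2
    have hk' : pvLookup t "matchup_id" = some k := hk
    simp only [Option.bind_some, hk']
    rw [pvAloop2_eq_find, pvFold_groups]
    have hcongr : List.filter (fun m => (pvLookup m "matchup_id").getD 0 == k) matchups =
        List.filter (fun m => pvLookup m "matchup_id" == some k) matchups := by
      apply List.filter_congr
      intro m hm
      obtain ⟨v, hv⟩ := Option.isSome_iff_exists.mp (hpre m hm).2
      simp [pvLookup] at hv ⊢
      simp [hv]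
    rw [hcongr]
    simp
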